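-- pv_equiv track=rewrite | github.com/neulab/InterpretEval | spanPrediction/tensorEvaluation-cws.py | bucketAttribute_SpecifiedBucketInterval_DiscreteValue
-- ===== SOURCE A (Python) =====
-- def sortDict(dict_obj, flag = "key"):
-- 	sorted_dict_obj  = []
-- 	if flag == "key":
-- 		sorted_dict_obj = sorted(dict_obj.items(), key=lambda item:item[0])
-- 	elif flag == "value":
-- 		#dict_bucket2span_
-- 		sorted_dict_obj = sorted(dict_obj.items(), key=lambda item:len(item[1]), reverse = True)
-- 	return dict(sorted_dict_obj)
--
-- def reverseDict_discrete(dict_a2b):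
-- 	dict_b2a = {}
-- 	for k, v in dict_a2b.items():
-- 		if v not in dict_b2a.keys():
-- 			dict_b2a[v] = [k]
-- 		else:
-- 			dict_b2a[v].append(k)
--
--
-- 	return dict_b2a
--
-- def bucketAttribute_SpecifiedBucketInterval_DiscreteValue(dict_span2attVal, bucket_name_list):
--
--
-- 	dict_bucket2span = {}
--
-- 	n_spans = len(dict_span2attVal)
-- 	dict_attVal2span = reverseDict_discrete(dict_span2attVal)
-- 	dict_attVal2span = sortDict(dict_attVal2span)
--
--
--
-- 	for attval, entity in dict_attVal2span.items():
-- 		attval_tuple = (attval,)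
-- 		if attval_tuple in bucket_name_list:
-- 					if attval_tuple not in dict_bucket2span.keys():
-- 							dict_bucket2span[attval_tuple] = entity
-- 					else:
-- 							dict_bucket2span[attval_tuple] += entity
--
-- 	return dict_bucket2span
-- ===== SOURCE B (Python) =====
-- def bucketAttribute_SpecifiedBucketInterval_DiscreteValue(dict_span2attVal, bucket_name_list):
-- 	dict_bucket2span = {}
-- 	for span, attval in dict_span2attVal.items():
-- 		if (attval,) in bucket_name_list:
-- 			dict_bucket2span.setdefault((attval,), []).append(span)
-- 	return dict(sorted(dict_bucket2span.items(), key=lambda item: item[0][0]))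
-- ===== Notes on version B (the rewrite author's own statement) =====
-- stated objective: simpler
-- what changed: Instead of building a full attval->spans reverse index, sorting all of its entries and then rebuilding a filtered dict in a second pass, B makes one pass over the dict items appending each span whose (attval,) is a named bucket into its bucket, and finally sorts just the bucketed entries by attribute value.
import Mathlib
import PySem

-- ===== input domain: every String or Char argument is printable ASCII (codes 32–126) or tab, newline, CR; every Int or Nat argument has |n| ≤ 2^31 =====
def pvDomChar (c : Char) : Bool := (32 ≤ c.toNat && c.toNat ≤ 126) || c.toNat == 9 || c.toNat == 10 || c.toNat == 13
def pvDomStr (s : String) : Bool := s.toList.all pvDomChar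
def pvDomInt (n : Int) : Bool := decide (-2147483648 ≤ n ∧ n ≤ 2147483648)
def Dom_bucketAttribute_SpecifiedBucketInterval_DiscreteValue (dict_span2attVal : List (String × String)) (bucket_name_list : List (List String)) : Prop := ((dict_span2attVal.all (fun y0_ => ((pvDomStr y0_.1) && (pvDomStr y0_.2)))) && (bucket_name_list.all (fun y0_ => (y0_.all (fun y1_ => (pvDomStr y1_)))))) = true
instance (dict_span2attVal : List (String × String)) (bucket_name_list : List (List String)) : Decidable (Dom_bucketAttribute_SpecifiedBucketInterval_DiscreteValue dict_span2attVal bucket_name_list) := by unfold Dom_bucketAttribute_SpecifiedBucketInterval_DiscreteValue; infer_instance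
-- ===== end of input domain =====

-- B replaces A's full reverse-index + sort-everything + second filtered rebuild by a single
-- filtered grouping pass over the dict items followed by one sort of the bucketed result
-- (simpler decomposition, same exact return value).


-- ===== PORT A =====
-- helper reverseDict_discrete(dict_a2b): group keys by value, first-occurrence order
def pvReverseDictDiscrete (dict_a2b : PySem.Dict String String) : PySem.Dict String (List String) :=
  dict_a2b.items.foldl (fun dict_b2a kv =>
    if dict_b2a.contains kv.2 = false then dict_b2a.insert kv.2 [kv.1]
    else dict_b2a.modify kv.2 [] (fun l => l ++ [kv.1]))   -- dict_b2a[v].append(k)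
    PySem.Dict.empty

-- helper sortDict(dict_obj, flag): sorted(items, key=...)  then dict(...)
def pvSortDict (dict_obj : PySem.Dict String (List String)) (flag : String) : PySem.Dict String (List String) :=
  let sorted_dict_obj : List (String × List String) := []
  let sorted_dict_obj :=
    if flag = "key" then PySem.List.sorted dict_obj.items (fun item => item.1) false
    else if flag = "value" then
      PySem.List.sorted dict_obj.items (fun item => (item.2.length : Int)) true
    else sorted_dict_obj
  PySem.Dict.ofList sorted_dict_obj

def bucketAttribute_SpecifiedBucketInterval_DiscreteValue (dict_span2attVal : List (String × String)) (bucket_name_list : List (List String)) : List (List String × List String) :=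
  -- the dict parameter, with Python's dict construction semantics
  let d := PySem.Dict.ofList dict_span2attVal
  let dict_attVal2span := pvReverseDictDiscrete d
  let dict_attVal2span := pvSortDict dict_attVal2span "key"
  let dict_bucket2span :=
    dict_attVal2span.items.foldl (fun dict_bucket2span ae =>
      let attval_tuple := [ae.1]
      if bucket_name_list.contains attval_tuple then
        if dict_bucket2span.contains attval_tuple = false then
          dict_bucket2span.insert attval_tuple ae.2
        else
          dict_bucket2span.modify attval_tuple [] (fun l => l ++ ae.2)   -- dict[t] += entity
      else dict_bucket2span)
      PySem.Dict.empty
  dict_bucket2span.items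

-- ===== PORT B =====
def bucketAttribute_SpecifiedBucketInterval_DiscreteValue_alt (dict_span2attVal : List (String × String)) (bucket_name_list : List (List String)) : List (List String × List String) :=
  let dict_bucket2span :=
    (PySem.Dict.ofList dict_span2attVal).items.foldl (fun db sa =>
      if bucket_name_list.contains [sa.2] then
        db.modify [sa.2] [] (fun l => l ++ [sa.1])   -- setdefault((attval,), []).append(span)
      else db)
      PySem.Dict.empty
  (PySem.Dict.ofList (PySem.List.sorted dict_bucket2span.items
      (fun item => PySem.List.pyGetD item.1 0 "") false)).items   -- key=lambda item: item[0][0]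

-- ===== PRECONDITION & SPEC =====
def Spec_bucketAttribute_SpecifiedBucketInterval_DiscreteValue (dict_span2attVal : List (String × String)) (bucket_name_list : List (List String)) (out : List (List String × List String)) : Prop := out = bucketAttribute_SpecifiedBucketInterval_DiscreteValue_alt dict_span2attVal bucket_name_list
instance (dict_span2attVal : List (String × String)) (bucket_name_list : List (List String)) (out : List (List String × List String)) : Decidable (Spec_bucketAttribute_SpecifiedBucketInterval_DiscreteValue dict_span2attVal bucket_name_list out) := by unfold Spec_bucketAttribute_SpecifiedBucketInterval_DiscreteValue; infer_instance

-- ===== CLAIM (what is proved, stated in full; the proofs are below) =====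
def Claim_equal_bucketAttribute_SpecifiedBucketInterval_DiscreteValue : Prop := ∀ (dict_span2attVal : List (String × String)) (bucket_name_list : List (List String)), Dom_bucketAttribute_SpecifiedBucketInterval_DiscreteValue dict_span2attVal bucket_name_list → Spec_bucketAttribute_SpecifiedBucketInterval_DiscreteValue dict_span2attVal bucket_name_list (bucketAttribute_SpecifiedBucketInterval_DiscreteValue dict_span2attVal bucket_name_list)

-- ===== LEMMAS AND PROOFS =====

-- dict(pairs) on pairwise-distinct keys is just the pair list
theorem pv_ofList_items {κ ν : Type} [BEq κ] [LawfulBEq κ] (l : List (κ × ν))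
    (h : (l.map (·.1)).Nodup) : (PySem.Dict.ofList l).items = l := by
  have := PySem.Dict.items_foldl_insert_fresh l (fun p => p.1) (fun p => p.2) PySem.Dict.empty
    (by intro a _; exact PySem.Dict.contains_empty _) h
  simpa [PySem.Dict.ofList, PySem.Dict.update] using this

theorem pv_modify_of_not_contains {κ ν : Type} [BEq κ] (d : PySem.Dict κ ν) (k : κ) (d0 : ν)
    (f : ν → ν) (h : d.contains k = false) : d.modify k d0 f = d.insert k (f d0) := by
  simp [PySem.Dict.modify, PySem.Dict.getD_of_not_contains d d0 h]

-- A's grouping step with the contains-test is the unconditional modify step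
theorem pv_revStep (b2a : PySem.Dict String (List String)) (p : String × String) :
    (if b2a.contains p.2 = false then b2a.insert p.2 [p.1]
     else b2a.modify p.2 [] (fun l => l ++ [p.1]))
      = b2a.modify p.2 [] (fun l => l ++ [p.1]) := by
  by_cases h : b2a.contains p.2 = false
  · rw [if_pos h, pv_modify_of_not_contains _ _ _ _ h]; rfl
  · rw [if_neg h]

-- A's final rebuild loop over fresh distinct keys appends, never merges
theorem pv_fold_fresh (l : List (String × List String)) (d : PySem.Dict (List String) (List String))
    (hd : ∀ p ∈ l, d.contains [p.1] = false) (hn : (l.map (·.1)).Nodup) :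
    (l.foldl (fun db ae =>
        if db.contains [ae.1] = false then db.insert [ae.1] ae.2
        else db.modify [ae.1] [] (fun s => s ++ ae.2)) d).items
      = d.items ++ l.map (fun p => ([p.1], p.2)) := by
  induction l generalizing d with
  | nil => simp
  | cons p t ih =>
    rw [List.map_cons] at hn
    obtain ⟨hnotin, hn2⟩ := List.nodup_cons.mp hn
    have hp : d.contains [p.1] = false := hd p (by simp)
    have hstep : (if d.contains [p.1] = false then d.insert [p.1] p.2
        else d.modify [p.1] [] (fun s => s ++ p.2)) = d.insert [p.1] p.2 := if_pos hp
    simp only [List.foldl_cons, hstep]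
    rw [ih (d.insert [p.1] p.2)
      (by
        intro q hq
        rw [PySem.Dict.contains_insert]
        have hne : q.1 ≠ p.1 := by
          intro he
          exact hnotin (he ▸ List.mem_map_of_mem hq)
        simp [hne, hd q (List.mem_cons_of_mem _ hq)])
      hn2]
    rw [PySem.Dict.items_insert_of_not_contains d p.2 hp]
    simp

-- dedup (set of first occurrences) commutes with filter
theorem pv_foldadd_filter {α : Type} [BEq α] [LawfulBEq α] (q : α → Bool) (l s : List α) :
    ((l.filter q).foldl PySem.Set.add (s.filter q)) = (l.foldl PySem.Set.add s).filter q := by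
  induction l generalizing s with
  | nil => simp
  | cons x t ih =>
    by_cases hq : q x = true
    · have : (PySem.Set.add s x).filter q = PySem.Set.add (s.filter q) x := by
        rw [PySem.Set.add_eq_ite, PySem.Set.add_eq_ite]
        by_cases hm : x ∈ s
        · rw [if_pos hm, if_pos (by simp [List.mem_filter, hm, hq])]
        · rw [if_neg hm, if_neg (by simp [List.mem_filter, hm]), List.filter_append]
          simp [hq]
      simp only [List.filter_cons, hq, if_pos, List.foldl_cons, ← this]
      exact ih (PySem.Set.add s x)
    · have : (PySem.Set.add s x).filter q = s.filter q := by
        rw [PySem.Set.add_eq_ite]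
        by_cases hm : x ∈ s
        · rw [if_pos hm]
        · rw [if_neg hm, List.filter_append]; simp [hq]
      simp only [List.filter_cons, hq, List.foldl_cons, ← this]
      rw [this]
      simpa [← this] using ih (PySem.Set.add s x)

theorem pv_ofList_filter {α : Type} [BEq α] [LawfulBEq α] (q : α → Bool) (l : List α) :
    PySem.Set.ofList (l.filter q) = (PySem.Set.ofList l).filter q := by
  simpa [PySem.Set.ofList_eq_foldl] using pv_foldadd_filter q l []

-- dedup commutes with the injective map a ↦ [a]
theorem pv_foldadd_sing (l s : List String) :
    ((l.map (fun a => [a])).foldl PySem.Set.add (s.map (fun a => [a])))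
      = (l.foldl PySem.Set.add s).map (fun a => [a]) := by
  induction l generalizing s with
  | nil => simp
  | cons x t ih =>
    have : PySem.Set.add (s.map (fun a => [a])) [x] = (PySem.Set.add s x).map (fun a => [a]) := by
      rw [PySem.Set.add_eq_ite, PySem.Set.add_eq_ite]
      by_cases hm : x ∈ s
      · rw [if_pos (List.mem_map_of_mem hm), if_pos hm]
      · rw [if_neg (by simp [hm]), if_neg hm]; simp
    simp only [List.map_cons, List.foldl_cons, this]
    exact ih (PySem.Set.add s x)

theorem pv_ofList_sing (l : List String) :
    PySem.Set.ofList (l.map (fun a => [a])) = (PySem.Set.ofList l).map (fun a => [a]) := by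
  simpa [PySem.Set.ofList_eq_foldl] using pv_foldadd_sing l []

theorem pv_pairwise_lt {α κ : Type} [LinearOrder κ] (l : List α) (k : α → κ)
    (hn : (l.map k).Nodup) (hle : l.Pairwise (fun a b => k a ≤ k b)) :
    l.Pairwise (fun a b => k a < k b) := by
  have hne : l.Pairwise (fun a b => k a ≠ k b) := (List.pairwise_map.mp hn)
  exact (hle.and hne).imp (fun h => lt_of_le_of_ne h.1 h.2)

-- the common core: both pipelines agree for ANY item list
theorem pv_core (its : List (String × String)) (bnl : List (List String)) :
    ((PySem.Dict.ofList (PySem.List.sorted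
        (its.foldl (fun dict_b2a kv =>
          if dict_b2a.contains kv.2 = false then dict_b2a.insert kv.2 [kv.1]
          else dict_b2a.modify kv.2 [] (fun l => l ++ [kv.1])) PySem.Dict.empty).items
        (fun item => item.1) false)).items.foldl
      (fun db ae =>
        if bnl.contains [ae.1] then
          if db.contains [ae.1] = false then db.insert [ae.1] ae.2
          else db.modify [ae.1] [] (fun l => l ++ ae.2)
        else db) PySem.Dict.empty).items
    =
    (PySem.Dict.ofList (PySem.List.sorted
        (its.foldl (fun db sa =>
          if bnl.contains [sa.2] then db.modify [sa.2] [] (fun l => l ++ [sa.1]) else db)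
          PySem.Dict.empty).items
        (fun item => PySem.List.pyGetD item.1 0 "") false)).items := by
  -- A's grouping fold is the unconditional modify fold
  have hGroup : its.foldl (fun dict_b2a kv =>
        if dict_b2a.contains kv.2 = false then dict_b2a.insert kv.2 [kv.1]
        else dict_b2a.modify kv.2 [] (fun l => l ++ [kv.1])) PySem.Dict.empty
      = its.foldl (fun d kv => d.modify kv.2 [] (fun l => l ++ [kv.1])) PySem.Dict.empty :=
    PySem.List.foldl_congr_mem its _ _ _ (fun acc x _ => pv_revStep acc x)
  rw [hGroup]
  set G := its.foldl (fun d kv => d.modify kv.2 [] (fun l => l ++ [kv.1])) PySem.Dict.empty with hG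
  have hGkeys : G.keys = PySem.Set.ofList (its.map (fun p => p.2)) := by
    have h1 : G.keys = PySem.Set.update (PySem.Dict.empty : PySem.Dict String (List String)).keys
        (its.map (fun kv => kv.2)) :=
      PySem.Dict.keys_foldl_modify_key its (fun kv => kv.2) [] (fun _ kv => fun l => l ++ [kv.1]) _
    rw [h1, PySem.Set.ofList_eq_foldl]
    rfl
  have hGnodup : G.keys.Nodup := by rw [hGkeys]; exact PySem.Set.nodup_ofList _
  have hGget : ∀ c, G.getD c [] = (its.filter (fun p => p.2 == c)).map (fun p => p.1) := by
    intro c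
    have h1 : G = (its.map (fun p => (p.2, p.1))).foldl
        (fun d p => d.modify p.1 [] (fun l => l ++ [p.2])) PySem.Dict.empty := by
      rw [List.foldl_map]
    rw [h1, PySem.Dict.getD_foldl_modify_append]
    simp [List.filter_map, Function.comp_def]
  have hGitems : G.items = G.keys.map (fun a => (a, G.getD a [])) :=
    PySem.Dict.items_eq_map_keys G hGnodup []
  set S := PySem.List.sorted G.items (fun item => item.1) false with hS
  have hSperm : S.Perm G.items := PySem.List.sorted_perm _ _ _
  have hSkeysnodup : (S.map (fun p => p.1)).Nodup := by
    simp only [PySem.Dict.keys] at hGnodup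
    exact (List.Perm.nodup_iff (hSperm.map (fun p => p.1))).mpr hGnodup
  -- A's side
  rw [pv_ofList_items S hSkeysnodup]
  rw [PySem.List.foldl_if_eq_foldl_filter (fun ae => bnl.contains [ae.1])
    (fun db ae => if db.contains [ae.1] = false then db.insert [ae.1] ae.2
      else db.modify [ae.1] [] (fun l => l ++ ae.2)) S PySem.Dict.empty]
  rw [pv_fold_fresh (S.filter (fun ae => bnl.contains [ae.1])) PySem.Dict.empty
    (fun p _ => PySem.Dict.contains_empty _)
    (hSkeysnodup.sublist (List.Sublist.map _ List.filter_sublist))]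
  -- B's side
  have hBfilter : List.foldl (fun db sa => if bnl.contains [sa.2] = true
          then db.modify [sa.2] [] (fun l => l ++ [sa.1]) else db) PySem.Dict.empty its
      = List.foldl (fun db sa => db.modify [sa.2] [] (fun l => l ++ [sa.1])) PySem.Dict.empty
          (its.filter (fun sa => bnl.contains [sa.2])) :=
    PySem.List.foldl_if_eq_foldl_filter (fun sa => bnl.contains [sa.2])
      (fun db sa => db.modify [sa.2] [] (fun l => l ++ [sa.1])) its PySem.Dict.empty
  rw [hBfilter]
  set l' := its.filter (fun sa => bnl.contains [sa.2]) with hl'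
  set res := l'.foldl (fun db sa => db.modify [sa.2] [] (fun l => l ++ [sa.1])) PySem.Dict.empty with hres
  have hreskeys : res.keys = PySem.Set.ofList (l'.map (fun sa => ([sa.2] : List String))) := by
    have h1 : res.keys = PySem.Set.update (PySem.Dict.empty : PySem.Dict (List String) (List String)).keys
        (l'.map (fun sa => [sa.2])) :=
      PySem.Dict.keys_foldl_modify_key l' (fun sa => [sa.2]) [] (fun _ sa => fun l => l ++ [sa.1]) _
    rw [h1, PySem.Set.ofList_eq_foldl]
    rfl
  have hresnodup : res.keys.Nodup := by rw [hreskeys]; exact PySem.Set.nodup_ofList _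
  have hresget : ∀ t, res.getD t [] = (l'.filter (fun p => ([p.2] : List String) == t)).map (fun p => p.1) := by
    intro t
    have h1 : res = (l'.map (fun p => (([p.2] : List String), p.1))).foldl
        (fun d p => d.modify p.1 [] (fun l => l ++ [p.2])) PySem.Dict.empty := by
      rw [List.foldl_map]
    rw [h1, PySem.Dict.getD_foldl_modify_append]
    simp [List.filter_map, Function.comp_def]
  have hresitems : res.items = res.keys.map (fun t => (t, res.getD t [])) :=
    PySem.Dict.items_eq_map_keys res hresnodup []
  -- res.keys in terms of G.keys
  have hkeys2 : res.keys = (G.keys.filter (fun a => bnl.contains [a])).map (fun a => [a]) := by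
    rw [hreskeys, hGkeys]
    have h2 : l'.map (fun sa => ([sa.2] : List String))
        = ((its.map (fun p => p.2)).filter (fun a => bnl.contains [a])).map (fun a => [a]) := by
      rw [hl', List.filter_map]
      simp [Function.comp_def, List.map_map]
    rw [h2, pv_ofList_sing, pv_ofList_filter]
  -- res values agree with G's groups on bucketed attvals
  have hval : ∀ a ∈ G.keys.filter (fun a => bnl.contains [a]), res.getD [a] [] = G.getD a [] := by
    intro a ha
    have hc : bnl.contains [a] = true := (List.mem_filter.mp ha).2
    rw [hresget [a], hGget a, hl', List.filter_filter]
    congr 1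
    apply List.filter_congr
    intro p _
    have hm : ([a] : List String) ∈ bnl := by simpa using hc
    by_cases h : p.2 = a
    · simp [h, hm]
    · simp [h]
  have hresitems2 : res.items
      = (G.keys.filter (fun a => bnl.contains [a])).map (fun a => ([a], G.getD a [])) := by
    rw [hresitems, hkeys2, List.map_map]
    exact List.map_congr_left (fun a ha => by simp [hval a ha])
  -- the filtered sorted items are the same list
  have hAlist : (S.filter (fun ae => bnl.contains [ae.1])).map (fun p => (([p.1] : List String), p.2))
      |>.Perm res.items := by
    rw [hresitems2]
    have h3 : G.items.filter (fun ae => bnl.contains [ae.1])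
        = (G.keys.filter (fun a => bnl.contains [a])).map (fun a => (a, G.getD a [])) := by
      rw [hGitems, List.filter_map]
      rfl
    have h4 := (hSperm.filter (fun ae => bnl.contains [ae.1])).map
      (fun p => (([p.1] : List String), p.2))
    rw [h3, List.map_map] at h4
    exact h4
  have hpw : ((S.filter (fun ae => bnl.contains [ae.1])).map
      (fun p => (([p.1] : List String), p.2))).Pairwise
      (fun x y => PySem.List.pyGetD x.1 0 "" < PySem.List.pyGetD y.1 0 "") := by
    rw [List.pairwise_map]
    have h5 : S.Pairwise (fun a b => a.1 < b.1) :=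
      pv_pairwise_lt S (fun p => p.1) hSkeysnodup (PySem.List.sorted_pairwise G.items (fun p => p.1))
    have h6 := h5.filter (fun ae => bnl.contains [ae.1])
    exact h6.imp (fun h => by simpa [PySem.List.pyGetD_zero_cons] using h)
  have hsortednodup : ((PySem.List.sorted res.items
      (fun item => PySem.List.pyGetD item.1 0 "") false).map (fun p => p.1)).Nodup := by
    simp only [PySem.Dict.keys] at hresnodup
    exact (List.Perm.nodup_iff ((PySem.List.sorted_perm res.items
      (fun item => PySem.List.pyGetD item.1 0 "") false).map
      (fun p : List String × List String => p.1))).mpr hresnodup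
  rw [pv_ofList_items _ hsortednodup]
  rw [PySem.List.sorted_eq_of_perm_of_pairwise_lt res.items _ _ hAlist hpw]
  simp [PySem.Dict.empty]

-- ===== VERDICT (by name: the statement is the Claim_ definition above) =====
theorem bucketAttribute_SpecifiedBucketInterval_DiscreteValue_spec : Claim_equal_bucketAttribute_SpecifiedBucketInterval_DiscreteValue := by
  intro dsv bnl _
  unfold Spec_bucketAttribute_SpecifiedBucketInterval_DiscreteValue
  unfold bucketAttribute_SpecifiedBucketInterval_DiscreteValue
    bucketAttribute_SpecifiedBucketInterval_DiscreteValue_alt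
    pvReverseDictDiscrete pvSortDict
  exact pv_core (PySem.Dict.ofList dsv).items bnl
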